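-- pv_equiv track=rewrite | github.com/chaiovercode/narrativ | packages/python-backend/services/image.py | _get_style_enforcement
-- ===== SOURCE A (Python) =====
-- def _get_style_enforcement(art_style: str) -> str:
--     """
--     Returns strong style enforcement instructions for non-photorealistic styles.
--     This prevents AI from defaulting to photorealism for real people.
--     """
--     style_lower = art_style.lower()
--
--     # Anime/Manga style enforcement
--     if any(k in style_lower for k in ['anime', 'manga', 'japanese']):
--         return """
-- <STYLE_DIRECTIVE>
-- ART STYLE: Anime/Manga Illustration
-- - Render in Japanese anime art style with cel-shading
-- - Use anime facial features and proportions
-- - Apply flat colors with clean cel-shaded shadows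
-- - Style reference: Studio Ghibli, Makoto Shinkai
-- ⚠️ IMPORTANT: Keep the SAME subject/person described below, just render them in anime style
-- </STYLE_DIRECTIVE>
-- """
--
--     # Comic/Pop Art style enforcement
--     elif any(k in style_lower for k in ['comic', 'pop art', 'marvel']):
--         return """
-- <STYLE_DIRECTIVE>
-- ART STYLE: Pop Art / Comic Book
-- - Render in bold comic book pop art style
-- - Use thick black outlines, halftone dots, flat primary colors
-- - Apply Roy Lichtenstein / Andy Warhol aesthetic
-- - Style reference: Marvel Comics, classic pop art
-- ⚠️ IMPORTANT: Keep the SAME subject/person described below, just render them in comic style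
-- </STYLE_DIRECTIVE>
-- """
--
--     # Cyberpunk/Neon style
--     elif any(k in style_lower for k in ['cyberpunk', 'neon']):
--         return """
-- <STYLE_DIRECTIVE>
-- ART STYLE: Cyberpunk Neon
-- - Apply strong neon lighting (cyan, magenta, pink)
-- - Dark atmospheric background with neon accents
-- - Style reference: Blade Runner 2049, Cyberpunk 2077
-- ⚠️ IMPORTANT: Keep the SAME subject/person described below, with cyberpunk lighting
-- </STYLE_DIRECTIVE>
-- """
--
--     # Minimalist style
--     elif any(k in style_lower for k in ['minimal', 'clean']):
--         return """
-- <STYLE_DIRECTIVE>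
-- ART STYLE: Minimalist / Clean
-- - Maximum white space and simplicity
-- - Clean geometric shapes, professional aesthetic
-- - Style reference: Apple design, Swiss typography
-- </STYLE_DIRECTIVE>
-- """
--
--     return ""
-- ===== SOURCE B (Python) =====
-- _ANIME = """
-- <STYLE_DIRECTIVE>
-- ART STYLE: Anime/Manga Illustration
-- - Render in Japanese anime art style with cel-shading
-- - Use anime facial features and proportions
-- - Apply flat colors with clean cel-shaded shadows
-- - Style reference: Studio Ghibli, Makoto Shinkai
-- \u26a0\ufe0f IMPORTANT: Keep the SAME subject/person described below, just render them in anime style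
-- </STYLE_DIRECTIVE>
-- """
-- _COMIC = """
-- <STYLE_DIRECTIVE>
-- ART STYLE: Pop Art / Comic Book
-- - Render in bold comic book pop art style
-- - Use thick black outlines, halftone dots, flat primary colors
-- - Apply Roy Lichtenstein / Andy Warhol aesthetic
-- - Style reference: Marvel Comics, classic pop art
-- \u26a0\ufe0f IMPORTANT: Keep the SAME subject/person described below, just render them in comic style
-- </STYLE_DIRECTIVE>
-- """
-- _CYBER = """
-- <STYLE_DIRECTIVE>
-- ART STYLE: Cyberpunk Neon
-- - Apply strong neon lighting (cyan, magenta, pink)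
-- - Dark atmospheric background with neon accents
-- - Style reference: Blade Runner 2049, Cyberpunk 2077
-- \u26a0\ufe0f IMPORTANT: Keep the SAME subject/person described below, with cyberpunk lighting
-- </STYLE_DIRECTIVE>
-- """
-- _MINIMAL = """
-- <STYLE_DIRECTIVE>
-- ART STYLE: Minimalist / Clean
-- - Maximum white space and simplicity
-- - Clean geometric shapes, professional aesthetic
-- - Style reference: Apple design, Swiss typography
-- </STYLE_DIRECTIVE>
-- """
--
-- # each keyword mapped to the priority rank of its style category
-- _KEYWORD_RANK = {
--     'anime': 0, 'manga': 0, 'japanese': 0,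
--     'comic': 1, 'pop art': 1, 'marvel': 1,
--     'cyberpunk': 2, 'neon': 2,
--     'minimal': 3, 'clean': 3,
-- }
-- _DIRECTIVES = [_ANIME, _COMIC, _CYBER, _MINIMAL]
--
--
-- def _get_style_enforcement(art_style: str) -> str:
--     style_lower = art_style.lower()
--     ranks = [r for k, r in _KEYWORD_RANK.items() if k in style_lower]
--     if not ranks:
--         return ""
--     return _DIRECTIVES[min(ranks)]
-- ===== Notes on version B (the rewrite author's own statement) =====
-- stated objective: alternative
-- what changed: Replaces the if-elif branch chain by a keyword-to-rank dictionary: B collects the ranks of all matching keywords in one comprehension and indexes a directive list by the minimum rank (branch priority = minimum rank), instead of testing keyword groups branch by branch.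
import Mathlib
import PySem

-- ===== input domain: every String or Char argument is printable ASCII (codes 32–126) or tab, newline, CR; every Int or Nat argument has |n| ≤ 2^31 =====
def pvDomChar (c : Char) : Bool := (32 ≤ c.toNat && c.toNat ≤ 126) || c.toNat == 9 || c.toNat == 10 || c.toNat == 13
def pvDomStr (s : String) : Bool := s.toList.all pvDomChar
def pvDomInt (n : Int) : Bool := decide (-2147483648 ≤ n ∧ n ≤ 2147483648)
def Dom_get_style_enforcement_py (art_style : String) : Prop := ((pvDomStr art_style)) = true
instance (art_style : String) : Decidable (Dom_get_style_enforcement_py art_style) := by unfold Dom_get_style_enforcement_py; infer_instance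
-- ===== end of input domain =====

-- B replaces A's if-elif branch chain by a keyword→rank map: it collects the ranks of all matching keywords in one pass and indexes the directive table by the minimum rank (objective: alternative; same cost).


-- ===== PORT A =====
def get_style_enforcement_py (art_style : String) : String :=
  let style_lower := PySem.Str.lower art_style
  if (["anime", "manga", "japanese"] : List String).any (fun k => PySem.Str.isIn k style_lower) then
    "\n<STYLE_DIRECTIVE>\nART STYLE: Anime/Manga Illustration\n- Render in Japanese anime art style with cel-shading\n- Use anime facial features and proportions\n- Apply flat colors with clean cel-shaded shadows\n- Style reference: Studio Ghibli, Makoto Shinkai\n⚠️ IMPORTANT: Keep the SAME subject/person described below, just render them in anime style\n</STYLE_DIRECTIVE>\n"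
  else if (["comic", "pop art", "marvel"] : List String).any (fun k => PySem.Str.isIn k style_lower) then
    "\n<STYLE_DIRECTIVE>\nART STYLE: Pop Art / Comic Book\n- Render in bold comic book pop art style\n- Use thick black outlines, halftone dots, flat primary colors\n- Apply Roy Lichtenstein / Andy Warhol aesthetic\n- Style reference: Marvel Comics, classic pop art\n⚠️ IMPORTANT: Keep the SAME subject/person described below, just render them in comic style\n</STYLE_DIRECTIVE>\n"
  else if (["cyberpunk", "neon"] : List String).any (fun k => PySem.Str.isIn k style_lower) then
    "\n<STYLE_DIRECTIVE>\nART STYLE: Cyberpunk Neon\n- Apply strong neon lighting (cyan, magenta, pink)\n- Dark atmospheric background with neon accents\n- Style reference: Blade Runner 2049, Cyberpunk 2077\n⚠️ IMPORTANT: Keep the SAME subject/person described below, with cyberpunk lighting\n</STYLE_DIRECTIVE>\n"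
  else if (["minimal", "clean"] : List String).any (fun k => PySem.Str.isIn k style_lower) then
    "\n<STYLE_DIRECTIVE>\nART STYLE: Minimalist / Clean\n- Maximum white space and simplicity\n- Clean geometric shapes, professional aesthetic\n- Style reference: Apple design, Swiss typography\n</STYLE_DIRECTIVE>\n"
  else ""

-- ===== PORT B =====
-- _KEYWORD_RANK from Source B: each keyword mapped to the priority rank of its style category
def pvKeywordRank : List (String × Int) :=
  [("anime", 0), ("manga", 0), ("japanese", 0),
   ("comic", 1), ("pop art", 1), ("marvel", 1),
   ("cyberpunk", 2), ("neon", 2),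
   ("minimal", 3), ("clean", 3)]

-- _DIRECTIVES from Source B, indexed by rank
def pvDirectives : List String :=
  [ "\n<STYLE_DIRECTIVE>\nART STYLE: Anime/Manga Illustration\n- Render in Japanese anime art style with cel-shading\n- Use anime facial features and proportions\n- Apply flat colors with clean cel-shaded shadows\n- Style reference: Studio Ghibli, Makoto Shinkai\n⚠️ IMPORTANT: Keep the SAME subject/person described below, just render them in anime style\n</STYLE_DIRECTIVE>\n",
    "\n<STYLE_DIRECTIVE>\nART STYLE: Pop Art / Comic Book\n- Render in bold comic book pop art style\n- Use thick black outlines, halftone dots, flat primary colors\n- Apply Roy Lichtenstein / Andy Warhol aesthetic\n- Style reference: Marvel Comics, classic pop art\n⚠️ IMPORTANT: Keep the SAME subject/person described below, just render them in comic style\n</STYLE_DIRECTIVE>\n",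
    "\n<STYLE_DIRECTIVE>\nART STYLE: Cyberpunk Neon\n- Apply strong neon lighting (cyan, magenta, pink)\n- Dark atmospheric background with neon accents\n- Style reference: Blade Runner 2049, Cyberpunk 2077\n⚠️ IMPORTANT: Keep the SAME subject/person described below, with cyberpunk lighting\n</STYLE_DIRECTIVE>\n",
    "\n<STYLE_DIRECTIVE>\nART STYLE: Minimalist / Clean\n- Maximum white space and simplicity\n- Clean geometric shapes, professional aesthetic\n- Style reference: Apple design, Swiss typography\n</STYLE_DIRECTIVE>\n" ]

def get_style_enforcement_py_alt (art_style : String) : String :=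
  let style_lower := PySem.Str.lower art_style
  let ranks := (pvKeywordRank.filter (fun kr => PySem.Str.isIn kr.1 style_lower)).map (fun kr => kr.2)
  match PySem.List.min? ranks (fun r => r) with
  | none => ""                                              -- 'if not ranks: return ""'
  | some m => (PySem.List.pyGet? pvDirectives m).getD ""    -- _DIRECTIVES[min(ranks)]; rank always in 0..3 so pyGet? is some

-- ===== PRECONDITION & SPEC =====
def Spec_get_style_enforcement_py (art_style : String) (out : String) : Prop := out = get_style_enforcement_py_alt art_style
instance (art_style : String) (out : String) : Decidable (Spec_get_style_enforcement_py art_style out) := by unfold Spec_get_style_enforcement_py; infer_instance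

-- ===== CLAIM =====
def Claim_equal_get_style_enforcement_py : Prop := ∀ (art_style : String), Dom_get_style_enforcement_py art_style → Spec_get_style_enforcement_py art_style (get_style_enforcement_py art_style)

-- ===== LEMMAS AND PROOFS =====

-- ===== VERDICT =====
set_option maxHeartbeats 4000000 in
theorem get_style_enforcement_py_spec : Claim_equal_get_style_enforcement_py := by
  intro s _
  unfold Spec_get_style_enforcement_py get_style_enforcement_py get_style_enforcement_py_alt
  simp only [pvKeywordRank, pvDirectives, List.any_cons, List.any_nil, Bool.or_false,
    List.filter_cons, List.filter_nil]
  generalize ("\n<STYLE_DIRECTIVE>\nART STYLE: Anime/Manga Illustration\n- Render in Japanese anime art style with cel-shading\n- Use anime facial features and proportions\n- Apply flat colors with clean cel-shaded shadows\n- Style reference: Studio Ghibli, Makoto Shinkai\n⚠️ IMPORTANT: Keep the SAME subject/person described below, just render them in anime style\n</STYLE_DIRECTIVE>\n" : String) = tA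
  generalize ("\n<STYLE_DIRECTIVE>\nART STYLE: Pop Art / Comic Book\n- Render in bold comic book pop art style\n- Use thick black outlines, halftone dots, flat primary colors\n- Apply Roy Lichtenstein / Andy Warhol aesthetic\n- Style reference: Marvel Comics, classic pop art\n⚠️ IMPORTANT: Keep the SAME subject/person described below, just render them in comic style\n</STYLE_DIRECTIVE>\n" : String) = tB
  generalize ("\n<STYLE_DIRECTIVE>\nART STYLE: Cyberpunk Neon\n- Apply strong neon lighting (cyan, magenta, pink)\n- Dark atmospheric background with neon accents\n- Style reference: Blade Runner 2049, Cyberpunk 2077\n⚠️ IMPORTANT: Keep the SAME subject/person described below, with cyberpunk lighting\n</STYLE_DIRECTIVE>\n" : String) = tC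
  generalize ("\n<STYLE_DIRECTIVE>\nART STYLE: Minimalist / Clean\n- Maximum white space and simplicity\n- Clean geometric shapes, professional aesthetic\n- Style reference: Apple design, Swiss typography\n</STYLE_DIRECTIVE>\n" : String) = tD
  cases h1 : PySem.Str.isIn "anime" (PySem.Str.lower s) <;>
  cases h2 : PySem.Str.isIn "manga" (PySem.Str.lower s) <;>
  cases h3 : PySem.Str.isIn "japanese" (PySem.Str.lower s) <;>
  cases h4 : PySem.Str.isIn "comic" (PySem.Str.lower s) <;>
  cases h5 : PySem.Str.isIn "pop art" (PySem.Str.lower s) <;>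
  cases h6 : PySem.Str.isIn "marvel" (PySem.Str.lower s) <;>
  cases h7 : PySem.Str.isIn "cyberpunk" (PySem.Str.lower s) <;>
  cases h8 : PySem.Str.isIn "neon" (PySem.Str.lower s) <;>
  cases h9 : PySem.Str.isIn "minimal" (PySem.Str.lower s) <;>
  cases h10 : PySem.Str.isIn "clean" (PySem.Str.lower s) <;>
  rfl
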